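-- pv_equiv track=rewrite | github.com/TheLostLambda/glycowork | build/lib/glycowork/motif/processing.py | small_motif_find
-- ===== SOURCE A (Python) =====
-- def small_motif_find(s):
--   """processes IUPACcondensed glycan sequence (string) without splitting it into glycowords"""
--   b = s.split('(')
--   b = [k.split(')') for k in b]
--   b = [item for sublist in b for item in sublist]
--   b = [k.strip('[') for k in b]
--   b = [k.strip(']') for k in b]
--   b = [k.replace('[', '') for k in b]
--   b = [k.replace(']', '') for k in b]
--   b = '*'.join(b)
--   return b
-- ===== SOURCE B (Python) =====
-- def small_motif_find(s):
--   """processes IUPACcondensed glycan sequence (string) without splitting it into glycowords"""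
--   out = []
--   for ch in s:
--     if ch == '(' or ch == ')':
--       out.append('*')
--     elif ch == '[' or ch == ']':
--       pass
--     else:
--       out.append(ch)
--   return ''.join(out)
-- ===== Notes on version B (the rewrite author's own statement) =====
-- stated objective: simpler
-- what changed: Replaces A's eight-stage split/nested-split/flatten/strip/strip/replace/replace/join pipeline with a single character-level scan that emits a star for each parenthesis, drops square brackets, and keeps every other character.
import Mathlib
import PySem

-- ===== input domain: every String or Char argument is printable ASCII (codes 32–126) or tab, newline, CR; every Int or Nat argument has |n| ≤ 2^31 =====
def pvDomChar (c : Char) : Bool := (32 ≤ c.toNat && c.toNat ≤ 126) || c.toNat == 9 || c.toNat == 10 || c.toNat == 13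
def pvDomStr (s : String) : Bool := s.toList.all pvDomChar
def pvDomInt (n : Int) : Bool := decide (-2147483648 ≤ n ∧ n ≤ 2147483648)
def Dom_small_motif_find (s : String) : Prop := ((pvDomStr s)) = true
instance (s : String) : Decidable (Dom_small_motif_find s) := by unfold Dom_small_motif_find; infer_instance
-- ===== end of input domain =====

-- B replaces A's split/flatten/strip/replace/join pipeline by a single character scan (objective: simpler).

-- ===== PORT A =====
def small_motif_find (s : String) : String :=
  let b1 := (PySem.Str.split? s "(").getD []
  let b2 := b1.map (fun k => (PySem.Str.split? k ")").getD [])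
  let b3 := b2.flatten
  let b4 := b3.map (fun k => PySem.Str.stripChars k "[")
  let b5 := b4.map (fun k => PySem.Str.stripChars k "]")
  let b6 := b5.map (fun k => PySem.Str.replace k "[" "")
  let b7 := b6.map (fun k => PySem.Str.replace k "]" "")
  PySem.Str.join "*" b7

-- ===== PORT B =====
def small_motif_find_alt (s : String) : String :=
  String.ofList (s.toList.foldl (fun out c =>
    if c = '(' || c = ')' then out ++ ['*']
    else if c = '[' || c = ']' then out
    else out ++ [c]) [])

-- ===== PRECONDITION & SPEC =====
def Spec_small_motif_find (s : String) (out : String) : Prop := out = small_motif_find_alt s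
instance (s : String) (out : String) : Decidable (Spec_small_motif_find s out) := by unfold Spec_small_motif_find; infer_instance

-- ===== CLAIM (what is proved, stated in full; the proofs are below) =====
def Claim_equal_small_motif_find : Prop := ∀ (s : String), Dom_small_motif_find s → Spec_small_motif_find s (small_motif_find s)

-- ===== LEMMAS AND PROOFS =====

-- the per-character emission B performs
def pvEmit (c : Char) : List Char :=
  if c = '(' || c = ')' then ['*'] else if c = '[' || c = ']' then [] else [c]

-- keep characters that are neither '[' nor ']'
def pvKeep (c : Char) : Bool := !(c == '[') && !(c == ']')

-- reference single-character split (what Python's split(sep) computes for a 1-char sep)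
def pvSplit (a : Char) : List Char → List (List Char)
  | [] => [[]]
  | c :: t =>
    match pvSplit a t with
    | [] => [[c]]
    | h :: r => if c = a then [] :: h :: r else (c :: h) :: r

lemma pvSplit_ne_nil (a : Char) (l : List Char) : pvSplit a l ≠ [] := by
  cases l with
  | nil => simp [pvSplit]
  | cons c t =>
    simp only [pvSplit]
    rcases h : pvSplit a t with _ | ⟨x, r⟩ <;> simp <;> split <;> simp

lemma splitOn_go_spec (a : Char) : ∀ (fuel : Nat) (l cur : List Char) (acc : List (List Char)),
    l.length ≤ fuel →
    PySem.Chars.splitOn.go [a] fuel l cur acc =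
      acc.reverse ++ (match pvSplit a l with
        | [] => [cur.reverse]
        | h :: r => (cur.reverse ++ h) :: r) := by
  intro fuel
  induction fuel with
  | zero =>
    intro l cur acc hl
    have : l = [] := List.length_eq_zero_iff.mp (Nat.le_zero.mp hl)
    subst this
    simp [PySem.Chars.splitOn.go, pvSplit]
  | succ f ih =>
    intro l cur acc hl
    cases l with
    | nil => simp [PySem.Chars.splitOn.go, pvSplit]
    | cons c rest =>
      have hpre : List.isPrefixOf [a] (c :: rest) = (a == c) := by
        simp [List.isPrefixOf]
      by_cases hc : c = a
      · subst hc
        rw [PySem.Chars.splitOn.go]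
        simp only [hpre, BEq.rfl, if_pos, List.length_cons, List.length_nil,
          List.drop_succ_cons, List.drop_zero]
        rw [ih rest [] (cur.reverse :: acc) (by simp only [List.length_cons] at hl; omega)]
        rcases h : pvSplit c rest with _ | ⟨x, r⟩
        · exact absurd h (pvSplit_ne_nil c rest)
        · simp only [pvSplit, h]
          simp
      · rw [PySem.Chars.splitOn.go]
        have : (a == c) = false := beq_eq_false_iff_ne.mpr (Ne.symm hc)
        simp only [hpre, this, if_neg, Bool.false_eq_true, not_false_iff]
        rw [ih rest (c :: cur) acc (by simp only [List.length_cons] at hl; omega)]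
        rcases h : pvSplit a rest with _ | ⟨x, r⟩
        · exact absurd h (pvSplit_ne_nil a rest)
        · simp only [pvSplit, h, hc, if_neg]
          simp

lemma splitOn_eq_pvSplit (a : Char) (l : List Char) :
    PySem.Chars.splitOn l [a] = pvSplit a l := by
  rw [PySem.Chars.splitOn, splitOn_go_spec a (l.length + 1) l [] [] (by omega)]
  rcases h : pvSplit a l with _ | ⟨x, r⟩
  · exact absurd h (pvSplit_ne_nil a l)
  · simp

lemma replace_go_spec (b : Char) : ∀ (fuel : Nat) (l acc : List Char),
    l.length ≤ fuel →
    PySem.Chars.replace.go [b] [] fuel l acc =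
      acc.reverse ++ l.filter (fun c => !(c == b)) := by
  intro fuel
  induction fuel with
  | zero =>
    intro l acc hl
    have : l = [] := List.length_eq_zero_iff.mp (Nat.le_zero.mp hl)
    subst this
    simp [PySem.Chars.replace.go]
  | succ f ih =>
    intro l acc hl
    cases l with
    | nil => simp [PySem.Chars.replace.go]
    | cons c rest =>
      have hpre : List.isPrefixOf [b] (c :: rest) = (b == c) := by
        simp [List.isPrefixOf]
      by_cases hc : c = b
      · subst hc
        rw [PySem.Chars.replace.go]
        simp only [hpre, BEq.rfl, if_pos, List.length_cons, List.length_nil,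
          List.drop_succ_cons, List.drop_zero, List.reverse_nil, List.nil_append]
        rw [ih rest acc (by simp only [List.length_cons] at hl; omega)]
        simp
      · rw [PySem.Chars.replace.go]
        have : (b == c) = false := beq_eq_false_iff_ne.mpr (Ne.symm hc)
        simp only [hpre, this, Bool.false_eq_true, if_neg, not_false_iff]
        rw [ih rest (c :: acc) (by simp only [List.length_cons] at hl; omega)]
        simp [hc]

lemma replace_single (b : Char) (l : List Char) :
    PySem.Chars.replace l [b] [] = l.filter (fun c => !(c == b)) := by
  rw [PySem.Chars.replace]
  simp only [List.isEmpty_cons, Bool.false_eq_true, if_neg, not_false_iff]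
  exact replace_go_spec b l.length l [] (le_refl _)

lemma filter_dropWhile_same (b : Char) (l : List Char) :
    (l.dropWhile (fun c => [b].contains c)).filter (fun c => !(c == b)) =
      l.filter (fun c => !(c == b)) := by
  induction l with
  | nil => simp
  | cons c t ih =>
    by_cases hc : c = b
    · subst hc; simpa [List.dropWhile_cons] using ih
    · have h1 : ([b].contains c) = false := by simp [hc, eq_comm]
      simp [List.dropWhile_cons, h1, List.filter_cons, hc]

lemma filter_stripChars_same (b : Char) (l : List Char) :
    (PySem.Chars.stripChars l [b]).filter (fun c => !(c == b)) =
      l.filter (fun c => !(c == b)) := by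
  rw [PySem.Chars.stripChars]
  rw [List.filter_reverse, filter_dropWhile_same, List.filter_reverse,
    filter_dropWhile_same]
  simp

-- A's four bracket-removal stages collapse to one filter
lemma clean_eq (k : List Char) :
    (PySem.Chars.replace
      (PySem.Chars.replace
        (PySem.Chars.stripChars (PySem.Chars.stripChars k ['[']) [']'])
        ['['] [])
      [']'] []) = k.filter pvKeep := by
  rw [replace_single, replace_single]
  rw [List.filter_comm]
  rw [filter_stripChars_same]
  rw [List.filter_comm]
  rw [filter_stripChars_same]
  rw [List.filter_filter]
  apply List.filter_congr
  intro x _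
  simp [pvKeep, Bool.and_comm]

-- the double split collapses to a split on both parens: cons behaviour
def pvG (cs : List Char) : List (List Char) :=
  (pvSplit '(' cs).flatMap (pvSplit ')')

lemma pvG_ne_nil (cs : List Char) : pvG cs ≠ [] := by
  unfold pvG
  rcases h : pvSplit '(' cs with _ | ⟨x, r⟩
  · exact absurd h (pvSplit_ne_nil _ _)
  · have := pvSplit_ne_nil ')' x
    simp [List.flatMap]
    rcases hx : pvSplit ')' x with _ | _
    · exact absurd hx this
    · simp

lemma pvG_cons_paren (c : Char) (t : List Char) (h : c = '(' ∨ c = ')') :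
    pvG (c :: t) = [] :: pvG t := by
  unfold pvG
  rcases hs : pvSplit '(' t with _ | ⟨x, r⟩
  · exact absurd hs (pvSplit_ne_nil _ _)
  · rcases h with h | h
    · subst h; simp [pvSplit, hs]
    · subst h
      have : pvSplit '(' (')' :: t) = (')' :: x) :: r := by simp [pvSplit, hs]
      rw [this]
      rcases hx : pvSplit ')' x with _ | ⟨y, r'⟩
      · exact absurd hx (pvSplit_ne_nil _ _)
      · simp [pvSplit, hx, hs]

lemma pvG_cons_other (c : Char) (t : List Char) (h1 : ¬ c = '(') (h2 : ¬ c = ')') :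
    ∃ h r, pvG t = h :: r ∧ pvG (c :: t) = (c :: h) :: r := by
  unfold pvG
  rcases hs : pvSplit '(' t with _ | ⟨x, r⟩
  · exact absurd hs (pvSplit_ne_nil _ _)
  · rcases hx : pvSplit ')' x with _ | ⟨y, r'⟩
    · exact absurd hx (pvSplit_ne_nil _ _)
    · refine ⟨y, r' ++ r.flatMap (pvSplit ')'), by simp [hx], ?_⟩
      have : pvSplit '(' (c :: t) = (c :: x) :: r := by simp [pvSplit, hs, h1]
      rw [this]
      simp [pvSplit, hx, h2]

lemma intercalate_cons (s x : List Char) (L : List (List Char)) :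
    List.intercalate s (x :: L) = x ++ if L = [] then [] else s ++ List.intercalate s L := by
  cases L <;> simp [List.intercalate]

lemma main_chars (cs : List Char) :
    PySem.Chars.join ['*'] ((pvG cs).map (List.filter pvKeep)) = cs.flatMap pvEmit := by
  induction cs with
  | nil => simp [pvG, pvSplit, PySem.Chars.join, List.intercalate]
  | cons c t ih =>
    by_cases hp : c = '(' ∨ c = ')'
    · rw [pvG_cons_paren c t hp]
      rcases hg : pvG t with _ | ⟨x, r⟩
      · exact absurd hg (pvG_ne_nil t)
      · rw [hg] at ih
        simp only [List.map_cons, List.filter_nil, PySem.Chars.join] at ih ⊢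
        rw [intercalate_cons]
        simp only [List.cons_ne_nil, if_neg, not_false_iff, List.nil_append,
          reduceIte, List.map_cons]
        rw [ih]
        have he : pvEmit c = ['*'] := by
          rcases hp with h | h <;> simp [pvEmit, h]
        simp [he]
    · push_neg at hp
      obtain ⟨x, r, hg, hcons⟩ := pvG_cons_other c t hp.1 hp.2
      rw [hcons]
      rw [hg] at ih
      by_cases hb : c = '[' ∨ c = ']'
      · have hk : pvKeep c = false := by
          rcases hb with h | h <;> simp [pvKeep, h]
        have he : pvEmit c = [] := by
          rcases hb with h | h <;> simp [pvEmit, h, hp.1, hp.2]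
        simp only [List.map_cons, List.filter_cons, hk, Bool.false_eq_true, if_neg,
          not_false_iff, reduceIte] at ih ⊢
        rw [ih]
        simp [List.flatMap_cons, he]
      · push_neg at hb
        have hk : pvKeep c = true := by simp [pvKeep, hb.1, hb.2]
        have he : pvEmit c = [c] := by simp [pvEmit, hp.1, hp.2, hb.1, hb.2]
        simp only [List.map_cons, List.filter_cons, hk, reduceIte] at ih ⊢
        simp only [List.flatMap_cons, he]
        simp only [PySem.Chars.join] at ih ⊢
        rw [intercalate_cons] at ih ⊢
        simp only [List.nil_append, List.cons_append] at ih ⊢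
        rw [ih]

lemma fold_eq_flatMap (cs : List Char) : ∀ acc : List Char,
    cs.foldl (fun out c =>
      if c = '(' || c = ')' then out ++ ['*']
      else if c = '[' || c = ']' then out
      else out ++ [c]) acc = acc ++ cs.flatMap pvEmit := by
  induction cs with
  | nil => simp
  | cons c t ih =>
    intro acc
    simp only [List.foldl_cons, List.flatMap_cons]
    by_cases hp : c = '(' ∨ c = ')'
    · have hb : (c = '(' || c = ')') = true := by
        rcases hp with h | h <;> simp [h]
      have he : pvEmit c = ['*'] := by rcases hp with h | h <;> simp [pvEmit, h]
      rw [if_pos hb, ih, he]; simp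
    · push_neg at hp
      have hb1 : (c = '(' || c = ')') = false := by simp [hp.1, hp.2]
      rw [if_neg (by simp [hb1])]
      by_cases hq : c = '[' ∨ c = ']'
      · have hb2 : (c = '[' || c = ']') = true := by
          rcases hq with h | h <;> simp [h]
        have he : pvEmit c = [] := by
          rcases hq with h | h <;> simp [pvEmit, h, hp.1, hp.2]
        rw [if_pos hb2, ih, he]; simp
      · push_neg at hq
        have he : pvEmit c = [c] := by simp [pvEmit, hp.1, hp.2, hq.1, hq.2]
        rw [if_neg (by simp [hq.1, hq.2]), ih, he]; simp

-- A-side: the four bracket-removal map stages collapse to one filter, elementwise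
lemma chain_maps (L : List String) :
    ((((L.map (fun k => PySem.Str.stripChars k "[")).map
        (fun k => PySem.Str.stripChars k "]")).map
        (fun k => PySem.Str.replace k "[" "")).map
        (fun k => PySem.Str.replace k "]" "")).map String.toList
      = (L.map String.toList).map (List.filter pvKeep) := by
  induction L with
  | nil => rfl
  | cons k t ih =>
    simp only [List.map_cons, List.cons.injEq]
    refine ⟨?_, ih⟩
    rw [PySem.Str.toList_replace, PySem.Str.toList_replace,
      PySem.Str.toList_stripChars, PySem.Str.toList_stripChars]
    exact clean_eq k.toList

lemma split_getD (t : String) (sep : String) (a : Char) (hsep : sep.toList = [a]) :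
    ((PySem.Str.split? t sep).getD []).map String.toList = pvSplit a t.toList := by
  have h := PySem.Str.split?_map t sep
  rw [PySem.Chars.split?, hsep] at h
  simp only [List.isEmpty_cons, Bool.false_eq_true, if_neg, not_false_iff] at h
  rcases hs : PySem.Str.split? t sep with _ | xs
  · rw [hs] at h; simp at h
  · rw [hs] at h
    simp only [Option.map_some, Option.some.injEq] at h
    simp only [Option.getD_some]
    rw [h, splitOn_eq_pvSplit]

-- A-side: push everything down to Chars level
lemma portA_toList (s : String) :
    (small_motif_find s).toList =
      PySem.Chars.join ['*'] ((pvG s.toList).map (List.filter pvKeep)) := by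
  unfold small_motif_find
  rw [PySem.Str.toList_join]
  have hstar : "*".toList = ['*'] := by decide
  rw [hstar, chain_maps]
  congr 1
  congr 1
  rw [List.map_flatten, List.map_map]
  simp only [Function.comp_def]
  rw [List.map_congr_left (g := fun k => pvSplit ')' k.toList)
    (fun k _ => split_getD k ")" ')' (by decide))]
  have hmm : ((PySem.Str.split? s "(").getD []).map (fun k => pvSplit ')' k.toList)
      = (((PySem.Str.split? s "(").getD []).map String.toList).map (pvSplit ')') := by
    rw [List.map_map]
    rfl
  rw [hmm, split_getD s "(" '(' (by decide)]
  rw [pvG, List.flatMap_def]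

-- ===== VERDICT (by name: the statement is the Claim_ definition above) =====
theorem small_motif_find_spec : Claim_equal_small_motif_find := by
  intro s _
  unfold Spec_small_motif_find small_motif_find_alt
  apply String.toList_injective ?_ |>.symm
  rw [portA_toList, main_chars]
  rw [fold_eq_flatMap]
  simp
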